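-- pv_equiv track=rewrite | github.com/cseriildi/Everybody-codes | Quest02/Solution.py | part2
-- ===== SOURCE A (Python) =====
-- def part2(input):
-- 	words, text = input
-- 	words += [word[::-1] for word in words]
-- 	indexes = set()
-- 	for word in words:
-- 		found_at = text.find(word)
-- 		while found_at != -1:
-- 			for i in range(len(word)):
-- 				indexes.add(found_at + i)
-- 			found_at = text.find(word, found_at + 1)
-- 	return len(indexes)
-- ===== SOURCE B (Python) =====
-- def part2(input):
-- 	words, text = input
-- 	n = len(text)
-- 	count = 0
-- 	for j in range(n):
-- 		if _covered(words, text, j):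
-- 			count += 1
-- 	return count
--
--
-- def _covered(words, text, j):
-- 	for w in words:
-- 		for p in (w, w[::-1]):
-- 			L = len(p)
-- 			if L:
-- 				for s in range(max(0, j - L + 1), j + 1):
-- 					if text[s:s+L] == p:
-- 						return True
-- 	return False
-- ===== Notes on version B (the rewrite author's own statement) =====
-- stated objective: alternative
-- what changed: A's word-centric find()-iteration that adds every index of every occurrence of every word/reversed word to a set and returns its size is replaced by a position-centric scan: for each text position, test with early exit whether some word or reversed-word occurrence covers it, and count.
import Mathlib
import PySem

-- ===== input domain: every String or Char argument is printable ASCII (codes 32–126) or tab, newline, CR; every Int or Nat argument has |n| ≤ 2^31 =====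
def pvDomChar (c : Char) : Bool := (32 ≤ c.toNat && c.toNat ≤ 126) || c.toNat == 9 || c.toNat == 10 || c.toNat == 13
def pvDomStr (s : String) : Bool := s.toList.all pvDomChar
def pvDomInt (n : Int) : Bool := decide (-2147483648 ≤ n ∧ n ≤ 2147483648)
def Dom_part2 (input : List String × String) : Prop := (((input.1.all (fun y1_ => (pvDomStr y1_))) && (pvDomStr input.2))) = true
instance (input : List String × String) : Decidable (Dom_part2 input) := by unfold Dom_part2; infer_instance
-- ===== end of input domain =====

-- B replaces A's word-centric find()-iteration (set of covered indices, then its size) by a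
-- position-centric scan that counts text positions covered by some word/reversed-word occurrence
-- (alternative decomposition, same exact count). Python A also mutates input[0] in place
-- (words += reversed words); the equivalence proved here is about the RETURN value only.
-- ===== PORT A =====
-- A needs this bound for termination of its find-loop (cited in decreasing_by).
theorem pvFindFromSuccBounds (cs w : List Char) (f : Nat)
    (h : PySem.Chars.findFrom cs w ((f : Int) + 1) none ≠ -1) :
    f < (PySem.Chars.findFrom cs w ((f : Int) + 1) none).toNat ∧
      (PySem.Chars.findFrom cs w ((f : Int) + 1) none).toNat ≤ cs.length := by
  have hc : ((f : Int) + 1) = ((f + 1 : Nat) : Int) := by push_cast; ring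
  rw [hc] at h ⊢
  by_cases hk : f + 1 ≤ cs.length
  · rw [PySem.Chars.findFrom_natCast cs w (f + 1) hk] at h ⊢
    by_cases hne : PySem.Chars.find (cs.drop (f + 1)) w = -1
    · simp [hne] at h
    · have h0 := PySem.Chars.neg_one_le_find (cs.drop (f + 1)) w
      have h1 := PySem.Chars.find_le_length (cs.drop (f + 1)) w
      rw [List.length_drop] at h1
      rw [if_neg hne]
      have h2 : PySem.Chars.find (cs.drop (f + 1)) w ≠ -1 := hne
      omega
  · exfalso
    apply h
    rw [← hc]
    have h0 : ¬ ((f : Int) + 1 < 0) := by omega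
    have h1 : ((cs.length : Int)) < (f : Int) + 1 := by omega
    simp [PySem.Chars.findFrom, h0, h1]

-- the 'while found_at != -1' loop of A, entered with 'found' = the occurrence just returned by find
def part2Go (cs w : List Char) (st : PySem.Set Int) (found : Nat) : PySem.Set Int :=
  let st' := (List.range w.length).foldl (fun acc (i : Nat) => PySem.Set.add acc ((found : Int) + (i : Int))) st
  let next := PySem.Chars.findFrom cs w ((found : Int) + 1) none
  if _h : next = -1 then st'
  else part2Go cs w st' next.toNat
termination_by cs.length + 1 - found
decreasing_by
  have := pvFindFromSuccBounds cs w found _h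
  omega

def part2 (input : List String × String) : Int :=
  let words := input.1
  let text := input.2
  let words2 := words ++ words.map (fun w => (PySem.Str.slice? w none none (-1)).getD w)
  let indexes : PySem.Set Int := PySem.Set.empty
  let indexes := words2.foldl (fun st w =>
    let f := PySem.Str.find text w
    if f = -1 then st else part2Go text.toList w.toList st f.toNat) indexes
  PySem.Set.len indexes

-- ===== PORT B =====
-- B helper: is text position j covered by an occurrence of some word or reversed word?
def coveredB (words : List String) (text : String) (j : Int) : Bool :=
  words.any (fun w =>
    [w, (PySem.Str.slice? w none none (-1)).getD w].any (fun p =>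
      let L := PySem.Str.len p
      decide (L ≠ 0) &&
        (PySem.List.pyRange (max 0 (j - L + 1)) (j + 1)).any (fun s =>
          PySem.Str.slice text (some s) (some (s + L)) == p)))

def part2_alt (input : List String × String) : Int :=
  (PySem.List.pyRange 0 (PySem.Str.len input.2)).foldl
    (fun c j => if coveredB input.1 input.2 j then c + 1 else c) 0

-- ===== PRECONDITION & SPEC =====
def Spec_part2 (input : List String × String) (out : Int) : Prop := out = part2_alt input
instance (input : List String × String) (out : Int) : Decidable (Spec_part2 input out) := by unfold Spec_part2; infer_instance

-- ===== CLAIM (what is proved, stated in full; the proofs are below) =====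
def Claim_equal_part2 : Prop := ∀ (input : List String × String), Dom_part2 input → Spec_part2 input (part2 input)

-- ===== LEMMAS AND PROOFS =====

-- position k of the text is covered by an occurrence of some word of `words` or its reverse
def CovA (words : List String) (text : String) (k : Nat) : Prop :=
  ∃ w ∈ words, ∃ p : List Char, (p = w.toList ∨ p = w.toList.reverse) ∧
    ∃ s : Nat, s ≤ k ∧ k < s + p.length ∧ p <+: text.toList.drop s

-- index x is covered by an occurrence of w starting at or after lo
def CovW (cs w : List Char) (lo : Nat) (x : Int) : Prop :=
  ∃ f : Nat, lo ≤ f ∧ w <+: cs.drop f ∧ ∃ i : Nat, i < w.length ∧ x = (f : Int) + i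

theorem pvPrefix_drop_infix (w s : List Char) (j : Nat) (h : w <+: s.drop j) : w <:+: s :=
  h.isInfix.trans (List.drop_suffix j s).isInfix

theorem pvAdds_mem (st : PySem.Set Int) (found : Nat) (m : Nat) (x : Int) :
    x ∈ (List.range m).foldl (fun acc (i : Nat) => PySem.Set.add acc ((found : Int) + (i : Int))) st ↔
      x ∈ st ∨ ∃ i : Nat, i < m ∧ x = (found : Int) + i := by
  rw [PySem.Set.mem_foldl_add (List.range m) (fun i : Nat => ((found : Int) + (i : Int))) st x]
  simp [List.mem_range]

theorem pvCovW_split (cs w : List Char) (found : Nat) (x : Int)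
    (hocc : w <+: cs.drop found) :
    CovW cs w found x ↔ (∃ i : Nat, i < w.length ∧ x = (found : Int) + i) ∨ CovW cs w (found + 1) x := by
  constructor
  · rintro ⟨f, hf, hpre, i, hi, hx⟩
    rcases Nat.eq_or_lt_of_le hf with heq | hlt
    · exact Or.inl ⟨i, hi, heq ▸ hx⟩
    · exact Or.inr ⟨f, hlt, hpre, i, hi, hx⟩
  · rintro (⟨i, hi, hx⟩ | ⟨f, hf, hpre, i, hi, hx⟩)
    · exact ⟨found, le_rfl, hocc, i, hi, hx⟩
    · exact ⟨f, by omega, hpre, i, hi, hx⟩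

theorem pvCovW_none (cs w : List Char) (found : Nat) (x : Int)
    (hn : PySem.Chars.findFrom cs w ((found : Int) + 1) none = -1) :
    ¬ CovW cs w (found + 1) x := by
  rintro ⟨f, hf, hpre, i, hi, hx⟩
  have hwlen : w.length ≤ cs.length - f := by
    have := hpre.length_le
    rwa [List.length_drop] at this
  have hk : found + 1 ≤ cs.length := by omega
  have hc : ((found : Int) + 1) = ((found + 1 : Nat) : Int) := by push_cast; ring
  rw [hc, PySem.Chars.findFrom_natCast_eq_neg_one_iff cs w (found + 1) hk] at hn
  apply hn
  have : cs.drop f = (cs.drop (found + 1)).drop (f - (found + 1)) := by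
    rw [List.drop_drop]; congr 1; omega
  rw [this] at hpre
  exact hpre.isInfix.trans (List.drop_suffix _ _).isInfix

theorem pvCovW_next (cs w : List Char) (found : Nat) (x : Int)
    (hle : found ≤ cs.length)
    (hn : PySem.Chars.findFrom cs w ((found : Int) + 1) none ≠ -1) :
    (CovW cs w (found + 1) x ↔ CovW cs w (PySem.Chars.findFrom cs w ((found : Int) + 1) none).toNat x) ∧
      w <+: cs.drop (PySem.Chars.findFrom cs w ((found : Int) + 1) none).toNat ∧
      found + 1 ≤ (PySem.Chars.findFrom cs w ((found : Int) + 1) none).toNat := by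
  have hb := pvFindFromSuccBounds cs w found hn
  have hk : found + 1 ≤ cs.length := by omega
  have hc : ((found : Int) + 1) = ((found + 1 : Nat) : Int) := by push_cast; ring
  rw [hc] at hn ⊢
  have hspec := PySem.Chars.findFrom_natCast_spec cs w (found + 1) hk hn
  rw [hc] at hb
  refine ⟨?_, hspec.2.1, by omega⟩
  constructor
  · rintro ⟨f, hf, hpre, i, hi, hx⟩
    refine ⟨f, ?_, hpre, i, hi, hx⟩
    by_contra hflt
    exact hspec.2.2 f hf (by omega) hpre
  · rintro ⟨f, hf, hpre, i, hi, hx⟩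
    exact ⟨f, by omega, hpre, i, hi, hx⟩

theorem pvGo_mem (cs w : List Char) (found : Nat) (st : PySem.Set Int) (x : Int)
    (hle : found ≤ cs.length) (hocc : w <+: cs.drop found) :
    x ∈ part2Go cs w st found ↔ x ∈ st ∨ CovW cs w found x := by
  suffices H : ∀ n found st, cs.length - found ≤ n → found ≤ cs.length → w <+: cs.drop found →
      (x ∈ part2Go cs w st found ↔ x ∈ st ∨ CovW cs w found x) from
    H (cs.length - found) found st le_rfl hle hocc
  intro n
  induction n with
  | zero =>
    intro found st hn hle hocc
    rw [part2Go]
    have hstop : PySem.Chars.findFrom cs w ((found : Int) + 1) none = -1 := by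
      by_contra hne
      have := pvFindFromSuccBounds cs w found hne
      omega
    rw [dif_pos hstop]
    rw [pvAdds_mem, pvCovW_split cs w found x hocc]
    have hnone := pvCovW_none cs w found x hstop
    constructor
    · rintro (h | h)
      · exact Or.inl h
      · exact Or.inr (Or.inl h)
    · rintro (h | h | h)
      · exact Or.inl h
      · exact Or.inr h
      · exact absurd h hnone
  | succ n ih =>
    intro found st hn hle hocc
    rw [part2Go]
    by_cases hstop : PySem.Chars.findFrom cs w ((found : Int) + 1) none = -1
    · rw [dif_pos hstop]
      rw [pvAdds_mem, pvCovW_split cs w found x hocc]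
      have hnone := pvCovW_none cs w found x hstop
      constructor
      · rintro (h | h)
        · exact Or.inl h
        · exact Or.inr (Or.inl h)
      · rintro (h | h | h)
        · exact Or.inl h
        · exact Or.inr h
        · exact absurd h hnone
    · rw [dif_neg hstop]
      have hb := pvFindFromSuccBounds cs w found hstop
      obtain ⟨hiff, hocc', hge⟩ := pvCovW_next cs w found x hle hstop
      rw [ih _ _ (by omega) (by omega) hocc']
      rw [pvAdds_mem, pvCovW_split cs w found x hocc, hiff]
      exact or_assoc

theorem pvGo_nodup (cs w : List Char) (found : Nat) (st : PySem.Set Int)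
    (h : st.Nodup) : (part2Go cs w st found).Nodup := by
  suffices H : ∀ n found st, cs.length - found ≤ n → st.Nodup → (part2Go cs w st found).Nodup from
    H (cs.length - found) found st le_rfl h
  intro n
  induction n with
  | zero =>
    intro found st hn h
    rw [part2Go]
    have hstop : PySem.Chars.findFrom cs w ((found : Int) + 1) none = -1 := by
      by_contra hne
      have := pvFindFromSuccBounds cs w found hne
      omega
    rw [dif_pos hstop, ← PySem.Set.update_map_eq_foldl_add]
    exact PySem.Set.nodup_update st _ h
  | succ n ih =>
    intro found st hn h
    rw [part2Go]
    by_cases hstop : PySem.Chars.findFrom cs w ((found : Int) + 1) none = -1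
    · rw [dif_pos hstop, ← PySem.Set.update_map_eq_foldl_add]
      exact PySem.Set.nodup_update st _ h
    · rw [dif_neg hstop]
      have hb := pvFindFromSuccBounds cs w found hstop
      refine ih _ _ (by omega) ?_
      rw [← PySem.Set.update_map_eq_foldl_add]
      exact PySem.Set.nodup_update st _ h

theorem pvStep_mem (text w : String) (st : PySem.Set Int) (x : Int) :
    x ∈ (if PySem.Str.find text w = -1 then st
         else part2Go text.toList w.toList st (PySem.Str.find text w).toNat) ↔
      x ∈ st ∨ CovW text.toList w.toList 0 x := by
  rw [PySem.Str.find_eq]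
  by_cases hf : PySem.Chars.find text.toList w.toList = -1
  · rw [if_pos hf]
    rw [PySem.Chars.find_eq_neg_one_iff] at hf
    have : ¬ CovW text.toList w.toList 0 x := by
      rintro ⟨f, -, hpre, i, hi, -⟩
      exact hf (pvPrefix_drop_infix _ _ _ hpre)
    tauto
  · rw [if_neg hf]
    have h0 : 0 ≤ PySem.Chars.find text.toList w.toList := by
      have := PySem.Chars.neg_one_le_find text.toList w.toList
      omega
    have hlen := PySem.Chars.find_le_length text.toList w.toList
    obtain ⟨hpre, hmin⟩ := PySem.Chars.find_spec h0
    rw [pvGo_mem text.toList w.toList _ st x (by omega) hpre]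
    have : CovW text.toList w.toList (PySem.Chars.find text.toList w.toList).toNat x ↔
        CovW text.toList w.toList 0 x := by
      constructor
      · rintro ⟨f, hfge, hp, i, hi, hx⟩
        exact ⟨f, Nat.zero_le f, hp, i, hi, hx⟩
      · rintro ⟨f, -, hp, i, hi, hx⟩
        refine ⟨f, ?_, hp, i, hi, hx⟩
        by_contra hlt
        exact hmin f (by omega) hp
    rw [this]

theorem pvWords_mem (text : String) (ws : List String) (st : PySem.Set Int) (x : Int) :
    x ∈ ws.foldl (fun st w =>
        let f := PySem.Str.find text w
        if f = -1 then st else part2Go text.toList w.toList st f.toNat) st ↔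
      x ∈ st ∨ ∃ w ∈ ws, CovW text.toList w.toList 0 x := by
  induction ws generalizing st with
  | nil => simp
  | cons w ws ih =>
    rw [List.foldl_cons, ih]
    simp only []
    rw [pvStep_mem]
    simp only [List.mem_cons]
    constructor
    · rintro ((h | h) | ⟨u, hu, h⟩)
      · exact Or.inl h
      · exact Or.inr ⟨w, Or.inl rfl, h⟩
      · exact Or.inr ⟨u, Or.inr hu, h⟩
    · rintro (h | ⟨u, (rfl | hu), h⟩)
      · exact Or.inl (Or.inl h)
      · exact Or.inl (Or.inr h)
      · exact Or.inr ⟨u, hu, h⟩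

theorem pvWords_nodup (text : String) (ws : List String) (st : PySem.Set Int) (h : st.Nodup) :
    (ws.foldl (fun st w =>
        let f := PySem.Str.find text w
        if f = -1 then st else part2Go text.toList w.toList st f.toNat) st).Nodup := by
  induction ws generalizing st with
  | nil => exact h
  | cons w ws ih =>
    rw [List.foldl_cons]
    apply ih
    simp only []
    split
    · exact h
    · exact pvGo_nodup _ _ _ _ h

-- the reversed copy A appends: its characters are the reversed characters
theorem pvRev_toList (w : String) :
    ((PySem.Str.slice? w none none (-1)).getD w).toList = w.toList.reverse := by
  rw [PySem.Str.slice?_none_none_neg_one]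
  simp [String.toList_ofList]

-- membership in A's final set, phrased through CovA
theorem pvFinal_mem (words : List String) (text : String) (x : Int) :
    x ∈ ((words ++ words.map (fun w => (PySem.Str.slice? w none none (-1)).getD w)).foldl
          (fun st w =>
            let f := PySem.Str.find text w
            if f = -1 then st else part2Go text.toList w.toList st f.toNat)
          PySem.Set.empty) ↔
      ∃ k : Nat, CovA words text k ∧ x = (k : Int) := by
  rw [pvWords_mem]
  simp only [PySem.Set.empty, List.not_mem_nil, false_or, List.mem_append, List.mem_map]
  constructor
  · rintro ⟨w, hw | ⟨u, hu, rfl⟩, f, -, hpre, i, hi, rfl⟩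
    · exact ⟨f + i, ⟨w, hw, w.toList, Or.inl rfl, f, by omega, by omega, hpre⟩, by push_cast; ring⟩
    · refine ⟨f + i, ⟨u, hu, u.toList.reverse, Or.inr rfl, f, by omega, ?_, ?_⟩, by push_cast; ring⟩
      · rw [pvRev_toList] at hi; omega
      · rw [pvRev_toList] at hpre; exact hpre
  · rintro ⟨k, ⟨w, hw, p, hp, s, hs, hk, hpre⟩, rfl⟩
    rcases hp with rfl | rfl
    · exact ⟨w, Or.inl hw, s, Nat.zero_le s, hpre, k - s, by omega, by omega⟩
    · refine ⟨(PySem.Str.slice? w none none (-1)).getD w, Or.inr ⟨w, hw, rfl⟩, s, Nat.zero_le s, ?_, k - s, ?_, by omega⟩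
      · rw [pvRev_toList]; exact hpre
      · rw [pvRev_toList]; omega

theorem pvCovA_lt_length (words : List String) (text : String) (k : Nat)
    (h : CovA words text k) : k < text.toList.length := by
  obtain ⟨w, -, p, -, s, hs, hk, hpre⟩ := h
  have := hpre.length_le
  rw [List.length_drop] at this
  omega

theorem pvCoveredB_iff (words : List String) (text : String) (k : Nat) :
    coveredB words text (k : Int) = true ↔ CovA words text k := by
  unfold coveredB CovA
  rw [List.any_eq_true]
  apply exists_congr; intro w
  rw [and_congr_right_iff]; intro _
  rw [List.any_eq_true]
  constructor
  · rintro ⟨p, hp, hcond⟩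
    simp only [List.mem_cons, List.not_mem_nil, or_false] at hp
    simp only [Bool.and_eq_true, decide_eq_true_eq, List.any_eq_true] at hcond
    obtain ⟨hL, s, hsmem, hslice⟩ := hcond
    rw [PySem.List.mem_pyRange_one] at hsmem
    rw [PySem.Str.len_eq] at hL hsmem
    have hs0 : 0 ≤ s := by omega
    have hsk : s.toNat ≤ k := by omega
    rw [beq_iff_eq] at hslice
    have htl : (PySem.Str.slice text (some s) (some (s + PySem.Str.len p))).toList = p.toList := by
      rw [hslice]
    rw [PySem.Str.toList_slice, PySem.Chars.slice_eq_listSlice, PySem.Str.len_eq] at htl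
    have hcast : s = ((s.toNat : Nat) : Int) := by omega
    rw [hcast, PySem.List.slice_natCast_add] at htl
    have hpre : p.toList <+: text.toList.drop s.toNat := by
      rw [List.prefix_iff_eq_take]
      exact htl.symm
    refine ⟨p.toList, ?_, s.toNat, hsk, by omega, hpre⟩
    rcases hp with rfl | rfl
    · exact Or.inl rfl
    · exact Or.inr (pvRev_toList w)
  · rintro ⟨p, hp, s, hs, hk, hpre⟩
    have hfound : ∃ q : String, (q = w ∨ q = (PySem.Str.slice? w none none (-1)).getD w) ∧ q.toList = p := by
      rcases hp with rfl | rfl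
      · exact ⟨w, Or.inl rfl, rfl⟩
      · exact ⟨(PySem.Str.slice? w none none (-1)).getD w, Or.inr rfl, pvRev_toList w⟩
    obtain ⟨q, hq, hqp⟩ := hfound
    refine ⟨q, by simpa using hq, ?_⟩
    simp only [Bool.and_eq_true, decide_eq_true_eq, List.any_eq_true]
    rw [PySem.Str.len_eq, hqp]
    refine ⟨by omega, (s : Int), ?_, ?_⟩
    · rw [PySem.List.mem_pyRange_one]
      omega
    · rw [beq_iff_eq]
      apply String.toList_inj.mp
      rw [PySem.Str.toList_slice, PySem.Chars.slice_eq_listSlice]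
      rw [(by omega : (s : Int) + (p.length : Int) = ((s : Nat) : Int) + ((p.length : Nat) : Int))]
      rw [PySem.List.slice_natCast_add, hqp]
      exact ((List.prefix_iff_eq_take.mp hpre).symm)

theorem pvCastInj : Function.Injective (fun k : Nat => (k : Int)) := fun a b h => by simpa using h

-- ===== VERDICT (by name: the statement is the Claim_ definition above) =====
theorem part2_spec : Claim_equal_part2 := by
  intro input _
  obtain ⟨words, text⟩ := input
  unfold Spec_part2 part2 part2_alt
  simp only []
  rw [PySem.Str.len_eq, PySem.List.pyRange_zero_natCast, List.foldl_map,
    PySem.List.foldl_count_if (fun k : Nat => coveredB words text (k : Int)) (List.range text.toList.length) 0]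
  have hnd : (((words ++ words.map (fun w => (PySem.Str.slice? w none none (-1)).getD w)).foldl
      (fun st w =>
        let f := PySem.Str.find text w
        if f = -1 then st else part2Go text.toList w.toList st f.toNat)
      PySem.Set.empty)).Nodup := pvWords_nodup text _ _ List.nodup_nil
  have hnd2 : (((List.range text.toList.length).filter
      (fun k : Nat => coveredB words text (k : Int))).map (fun k : Nat => (k : Int))).Nodup :=
    (List.nodup_range.filter _).map pvCastInj
  have hperm : ((words ++ words.map (fun w => (PySem.Str.slice? w none none (-1)).getD w)).foldl
      (fun st w =>
        let f := PySem.Str.find text w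
        if f = -1 then st else part2Go text.toList w.toList st f.toNat)
      PySem.Set.empty).Perm
      (((List.range text.toList.length).filter
        (fun k : Nat => coveredB words text (k : Int))).map (fun k : Nat => (k : Int))) := by
    rw [List.perm_ext_iff_of_nodup hnd hnd2]
    intro x
    rw [pvFinal_mem words text x]
    simp only [List.mem_map, List.mem_filter, List.mem_range]
    constructor
    · rintro ⟨k, hcov, rfl⟩
      exact ⟨k, ⟨pvCovA_lt_length _ _ _ hcov, (pvCoveredB_iff _ _ _).mpr hcov⟩, rfl⟩
    · rintro ⟨k, ⟨-, hc⟩, rfl⟩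
      exact ⟨k, (pvCoveredB_iff _ _ _).mp hc, rfl⟩
  have hlen := hperm.length_eq
  rw [List.length_map, ← List.countP_eq_length_filter] at hlen
  simp only [PySem.Set.len, hlen]
  omega
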